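-- pv_equiv track=rewrite | github.com/aarongalbraith/connect-four | ConnectFour.py | choiceMiddleOut
-- ===== SOURCE A (Python) =====
-- numCols = 7
--
-- def choiceMiddleOut(moves):
-- 	if (numCols%2 == 1):
-- 		mid = int((numCols-1)/2)
-- 		for i in moves:
-- 			if (i == mid):
-- 				return mid
-- 	else:
-- 		mid = int(numCols/2)
-- 	for i in range(mid):
-- 		p1 = mid-i-1
-- 		if (numCols%2 == 1):
-- 			p2 = mid+i+1
-- 		else:
-- 			p2 = mid+i
-- 		for j in moves:
-- 			if (j == p1):
-- 				return p1
-- 			if (j == p2):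
-- 				return p2
-- 	return moves[0]
-- ===== SOURCE B (Python) =====
-- numCols = 7
--
-- def choiceMiddleOut(moves):
--     mid = (numCols - 1) // 2
--     best = None
--     best_d = None
--     for m in moves:
--         if 0 <= m < numCols:
--             d = abs(m - mid)
--             if best is None or d < best_d:
--                 best = m
--                 best_d = d
--     return best if best is not None else moves[0]
-- ===== Notes on version B (the rewrite author's own statement) =====
-- stated objective: simpler
-- what changed: A scans moves up to four times, once per distance-to-middle priority level; B makes a single pass over moves keeping the in-range column with the strictly smallest distance to the middle (first occurrence wins ties), falling back to the first move when no in-range column exists.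
import Mathlib
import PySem

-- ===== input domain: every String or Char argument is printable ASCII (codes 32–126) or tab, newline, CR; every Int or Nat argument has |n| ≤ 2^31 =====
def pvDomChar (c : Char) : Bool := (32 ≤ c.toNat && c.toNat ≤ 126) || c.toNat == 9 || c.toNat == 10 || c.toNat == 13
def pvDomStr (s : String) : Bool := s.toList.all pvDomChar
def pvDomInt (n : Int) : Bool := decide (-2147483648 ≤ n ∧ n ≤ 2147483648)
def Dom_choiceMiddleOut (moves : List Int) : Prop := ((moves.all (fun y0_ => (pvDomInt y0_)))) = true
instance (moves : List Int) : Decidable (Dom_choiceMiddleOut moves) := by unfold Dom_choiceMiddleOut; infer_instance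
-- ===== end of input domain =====

-- B replaces A's four priority-ordered scans of `moves` with one pass keeping the
-- in-range move of strictly smallest distance to the middle column (first wins ties):
-- objective 'simpler'. Equivalence is about the return value; neither mutates its input.

-- ===== PORT A =====
def numColsA : Int := 7

-- `for i in moves: if i == mid: return mid`
def cmoScanMid (mid : Int) : List Int → Option Int
  | [] => none
  | i :: rest => if i = mid then some mid else cmoScanMid mid rest

-- `for j in moves: if j == p1: return p1; if j == p2: return p2`
def cmoScanPair (p1 p2 : Int) : List Int → Option Int
  | [] => none
  | j :: rest =>
    if j = p1 then some p1
    else if j = p2 then some p2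
    else cmoScanPair p1 p2 rest

-- `for i in range(mid): …`
def cmoOuter (moves : List Int) (mid : Int) : List Int → Option Int
  | [] => none
  | i :: rest =>
    let p1 := mid - i - 1
    let p2 := if numColsA % 2 = 1 then mid + i + 1 else mid + i
    match cmoScanPair p1 p2 moves with
    | some r => some r
    | none => cmoOuter moves mid rest

def choiceMiddleOut (moves : List Int) : Int :=
  let mid : Int := if numColsA % 2 = 1 then (numColsA - 1) / 2 else numColsA / 2
  let early : Option Int := if numColsA % 2 = 1 then cmoScanMid mid moves else none
  match early with
  | some r => r
  | none =>
    match cmoOuter moves mid (PySem.List.pyRange 0 mid 1) with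
    | some r => r
    | none => (PySem.List.pyGet? moves 0).getD 0   -- fallback to the first move; Pre_ excludes the empty list

-- ===== PORT B =====
-- single pass: best so far and its distance; update only on strictly smaller distance
def cmoAltLoop (mid : Int) : List Int → Option (Int × Int) → Option (Int × Int)
  | [], best => best
  | m :: rest, best =>
    if 0 ≤ m ∧ m < numColsA then
      let d := |m - mid|
      match best with
      | none => cmoAltLoop mid rest (some (m, d))
      | some (_, bd) =>
        if d < bd then cmoAltLoop mid rest (some (m, d)) else cmoAltLoop mid rest best
    else cmoAltLoop mid rest best

def choiceMiddleOut_alt (moves : List Int) : Int :=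
  let mid : Int := PySem.Int.floordiv (numColsA - 1) 2
  match cmoAltLoop mid moves none with
  | some (b, _) => b
  | none => (PySem.List.pyGet? moves 0).getD 0   -- fallback to the first move; Pre_ excludes the empty list

-- ===== PRECONDITION & SPEC =====
-- On the empty list A's fallback indexing of the first element raises IndexError; B raises there too.
def Pre_choiceMiddleOut (moves : List Int) : Prop := moves ≠ []
instance (moves : List Int) : Decidable (Pre_choiceMiddleOut moves) := by unfold Pre_choiceMiddleOut; infer_instance
def pvWitness_choiceMiddleOut : List Int := [9, 4, 2]

def Spec_choiceMiddleOut (moves : List Int) (out : Int) : Prop := out = choiceMiddleOut_alt moves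
instance (moves : List Int) (out : Int) : Decidable (Spec_choiceMiddleOut moves out) := by unfold Spec_choiceMiddleOut; infer_instance

-- ===== CLAIM (what is proved, stated in full; the proofs are below) =====
def Claim_equal_choiceMiddleOut : Prop := ∀ (moves : List Int), Dom_choiceMiddleOut moves → Pre_choiceMiddleOut moves → Spec_choiceMiddleOut moves (choiceMiddleOut moves)

-- ===== LEMMAS AND PROOFS =====

-- distance of an in-range column to the middle, `none` for out-of-range moves
def distOpt (m : Int) : Option Int :=
  if 0 ≤ m ∧ m < 7 then some |m - 3| else none

-- minimal distance over the in-range elements of the list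
def mopt : List Int → Option Int
  | [] => none
  | x :: r =>
    match distOpt x, mopt r with
    | none, o => o
    | some d, none => some d
    | some d, some m => some (min d m)

-- first element at distance d
def findD (d : Int) (xs : List Int) : Option Int :=
  xs.find? (fun x => decide (distOpt x = some d))

theorem abs3_cases (x : Int) : |x - 3| = 3 - x ∨ |x - 3| = x - 3 := by
  rcases lt_or_ge x 3 with h | h
  · left; rw [abs_of_neg (by omega)]; ring
  · right; rw [abs_of_nonneg (by omega)]

theorem distOpt_eq_iff (x d : Int) (hd : 0 ≤ d) :
    distOpt x = some d ↔ ((x = 3 - d ∨ x = 3 + d) ∧ 0 ≤ x ∧ x < 7) := by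
  unfold distOpt
  have := abs3_cases x
  have h0 : 0 ≤ |x - 3| := abs_nonneg _
  split
  · simp only [Option.some.injEq]
    omega
  · simp only [reduceCtorEq, false_iff]
    omega

theorem distOpt_range (x d : Int) (h : distOpt x = some d) : 0 ≤ d ∧ d ≤ 3 := by
  unfold distOpt at h
  have := abs3_cases x
  have h0 : 0 ≤ |x - 3| := abs_nonneg _
  split at h
  · simp only [Option.some.injEq] at h
    omega
  · exact absurd h (by simp)

theorem findD_cons_none (x : Int) (r : List Int) (d : Int) (h : distOpt x ≠ some d) :
    findD d (x :: r) = findD d r := by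
  simp [findD, List.find?, h]

theorem findD_cons_some (x : Int) (r : List Int) (d : Int) (h : distOpt x = some d) :
    findD d (x :: r) = some x := by
  simp [findD, List.find?, h]

theorem altLoop_some_char (xs : List Int) : ∀ (b bd : Int),
    cmoAltLoop 3 xs (some (b, bd)) =
      match mopt xs with
      | none => some (b, bd)
      | some m => if m < bd then (findD m xs).map (fun c => (c, m)) else some (b, bd) := by
  induction xs with
  | nil => intro b bd; simp [cmoAltLoop, mopt]
  | cons x r ih =>
    intro b bd
    by_cases hx : 0 ≤ x ∧ x < 7
    · have hd : distOpt x = some |x - 3| := by simp [distOpt, hx]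
      by_cases hlt : |x - 3| < bd
      · have hstep : cmoAltLoop 3 (x :: r) (some (b, bd)) = cmoAltLoop 3 r (some (x, |x - 3|)) := by
          simp [cmoAltLoop, hx, numColsA, hlt]
        rw [hstep, ih x |x - 3|]
        cases hmr : mopt r with
        | none =>
          simp [mopt, hd, hmr, hlt, findD_cons_some x r _ hd]
        | some mr =>
          by_cases hmd : mr < |x - 3|
          · simp [mopt, hd, hmr, hmd, show min |x-3| mr = mr by omega,
                  findD_cons_none x r mr (by rw [hd]; simp; omega),
                  if_pos (show mr < bd by omega)]
          · simp [mopt, hd, hmr, hmd, show min |x-3| mr = |x-3| by omega, hlt,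
                  findD_cons_some x r _ hd]
      · have hstep : cmoAltLoop 3 (x :: r) (some (b, bd)) = cmoAltLoop 3 r (some (b, bd)) := by
          simp [cmoAltLoop, hx, numColsA, hlt]
        rw [hstep, ih b bd]
        cases hmr : mopt r with
        | none => simp [mopt, hd, hmr, hlt]
        | some mr =>
          by_cases hmb : mr < bd
          · simp [mopt, hd, hmr, hmb, show min |x-3| mr = mr by omega,
                  findD_cons_none x r mr (by rw [hd]; simp; omega)]
          · simp [mopt, hd, hmr, hmb, show ¬ (min |x-3| mr < bd) by omega]
    · have hd : distOpt x = none := by simp [distOpt, hx]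
      have hstep : cmoAltLoop 3 (x :: r) (some (b, bd)) = cmoAltLoop 3 r (some (b, bd)) := by
        simp [cmoAltLoop, hx, numColsA]
      rw [hstep, ih b bd]
      have hfe : ∀ m, findD m (x :: r) = findD m r := fun m =>
        findD_cons_none x r m (by rw [hd]; simp)
      cases hmr : mopt r with
      | none => simp [mopt, hd, hmr]
      | some mr => simp [mopt, hd, hmr, hfe]

theorem altLoop_none_char (xs : List Int) :
    cmoAltLoop 3 xs none =
      match mopt xs with
      | none => none
      | some m => (findD m xs).map (fun c => (c, m)) := by
  induction xs with
  | nil => simp [cmoAltLoop, mopt]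
  | cons x r ih =>
    by_cases hx : 0 ≤ x ∧ x < 7
    · have hd : distOpt x = some |x - 3| := by simp [distOpt, hx]
      have hstep : cmoAltLoop 3 (x :: r) none = cmoAltLoop 3 r (some (x, |x - 3|)) := by
        simp [cmoAltLoop, hx, numColsA]
      rw [hstep, altLoop_some_char r x |x - 3|]
      cases hmr : mopt r with
      | none =>
        simp [mopt, hd, hmr, findD_cons_some x r _ hd]
      | some mr =>
        by_cases hmd : mr < |x - 3|
        · simp [mopt, hd, hmr, hmd, show min |x-3| mr = mr by omega,
                findD_cons_none x r mr (by rw [hd]; simp; omega)]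
        · simp [mopt, hd, hmr, hmd, show min |x-3| mr = |x-3| by omega,
                findD_cons_some x r _ hd]
    · have hd : distOpt x = none := by simp [distOpt, hx]
      have hstep : cmoAltLoop 3 (x :: r) none = cmoAltLoop 3 r none := by
        simp [cmoAltLoop, hx, numColsA]
      rw [hstep, ih]
      have hfe : ∀ m, findD m (x :: r) = findD m r := fun m =>
        findD_cons_none x r m (by rw [hd]; simp)
      cases hmr : mopt r with
      | none => simp [mopt, hd, hmr]
      | some mr => simp [mopt, hd, hmr, hfe]

theorem scanMid_eq (xs : List Int) : cmoScanMid 3 xs = findD 0 xs := by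
  induction xs with
  | nil => simp [cmoScanMid, findD]
  | cons x r ih =>
    by_cases hx : x = 3
    · subst hx
      rw [findD_cons_some 3 r 0 (by simp [distOpt]), cmoScanMid, if_pos rfl]
    · rw [findD_cons_none x r 0 (by intro hc; rw [distOpt_eq_iff x 0 le_rfl] at hc; omega),
          cmoScanMid, if_neg hx, ih]

theorem scanPair_eq (d : Int) (hd : d = 1 ∨ d = 2 ∨ d = 3) (xs : List Int) :
    cmoScanPair (3 - d) (3 + d) xs = findD d xs := by
  induction xs with
  | nil => simp [cmoScanPair, findD]
  | cons x r ih =>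
    by_cases h1 : x = 3 - d
    · rw [findD_cons_some x r d ((distOpt_eq_iff x d (by omega)).2 (by omega)),
          cmoScanPair, if_pos h1, h1]
    · by_cases h2 : x = 3 + d
      · rw [findD_cons_some x r d ((distOpt_eq_iff x d (by omega)).2 (by omega)),
            cmoScanPair, if_neg h1, if_pos h2, h2]
      · rw [findD_cons_none x r d (by intro hc; rw [distOpt_eq_iff x d (by omega)] at hc; omega),
            cmoScanPair, if_neg h1, if_neg h2, ih]

theorem findD_none_of_mopt_none (xs : List Int) (h : mopt xs = none) (d : Int) :
    findD d xs = none := by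
  induction xs with
  | nil => simp [findD]
  | cons x r ih =>
    cases hx : distOpt x with
    | none =>
      have hr : mopt r = none := by
        rw [mopt, hx] at h; exact h
      rw [findD_cons_none x r d (by rw [hx]; simp)]
      exact ih hr
    | some dx =>
      exfalso
      rw [mopt, hx] at h
      cases hmr : mopt r <;> rw [hmr] at h <;> simp at h

theorem mopt_bounds (xs : List Int) : ∀ (m : Int), mopt xs = some m → 0 ≤ m ∧ m ≤ 3 := by
  induction xs with
  | nil => intro m h; simp [mopt] at h
  | cons x r ih =>
    intro m h
    cases hx : distOpt x with
    | none =>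
      rw [mopt, hx] at h
      exact ih m h
    | some dx =>
      have hdx := distOpt_range x dx hx
      rw [mopt, hx] at h
      cases hmr : mopt r with
      | none => rw [hmr] at h; simp at h; omega
      | some mr =>
        rw [hmr] at h; simp at h
        have := ih mr hmr
        omega

theorem findD_lt_none (xs : List Int) : ∀ (m : Int), mopt xs = some m →
    ∀ (d : Int), d < m → findD d xs = none := by
  induction xs with
  | nil => intro m _ d _; simp [findD]
  | cons x r ih =>
    intro m h d hdm
    cases hx : distOpt x with
    | none =>
      rw [mopt, hx] at h
      rw [findD_cons_none x r d (by rw [hx]; simp)]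
      exact ih m h d hdm
    | some dx =>
      rw [mopt, hx] at h
      cases hmr : mopt r with
      | none =>
        rw [hmr] at h; simp at h
        rw [findD_cons_none x r d (by rw [hx]; simp; omega)]
        exact findD_none_of_mopt_none r hmr d
      | some mr =>
        rw [hmr] at h; simp at h
        rw [findD_cons_none x r d (by rw [hx]; simp; omega)]
        exact ih mr hmr d (by omega)

theorem findD_mopt_isSome (xs : List Int) : ∀ (m : Int), mopt xs = some m →
    (findD m xs).isSome := by
  induction xs with
  | nil => intro m h; simp [mopt] at h
  | cons x r ih =>
    intro m h
    cases hx : distOpt x with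
    | none =>
      rw [mopt, hx] at h
      rw [findD_cons_none x r m (by rw [hx]; simp)]
      exact ih m h
    | some dx =>
      rw [mopt, hx] at h
      cases hmr : mopt r with
      | none =>
        rw [hmr] at h; simp at h; subst h
        rw [findD_cons_some x r dx hx]; rfl
      | some mr =>
        rw [hmr] at h; simp at h
        by_cases hle : dx ≤ mr
        · rw [show m = dx by omega] at *
          rw [findD_cons_some x r dx hx]; rfl
        · rw [show m = mr by omega] at *
          by_cases hxe : dx = mr
          · rw [findD_cons_some x r mr (by rw [hx, hxe])]; rfl
          · rw [findD_cons_none x r mr (by rw [hx]; simp; omega)]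
            exact ih mr hmr

-- A as the chain of finds by increasing distance
theorem portA_char (moves : List Int) :
    choiceMiddleOut moves =
      match findD 0 moves with
      | some r => r
      | none =>
        match findD 1 moves with
        | some r => r
        | none =>
          match findD 2 moves with
          | some r => r
          | none =>
            match findD 3 moves with
            | some r => r
            | none => (PySem.List.pyGet? moves 0).getD 0 := by
  have h1 := scanPair_eq 1 (by omega) moves
  have h2 := scanPair_eq 2 (by omega) moves
  have h3 := scanPair_eq 3 (by omega) moves
  norm_num at h1 h2 h3
  simp only [choiceMiddleOut, numColsA]
  norm_num
  rw [show PySem.List.pyRange 0 3 1 = ([0, 1, 2] : List Int) from by decide]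
  simp only [cmoOuter, numColsA]
  norm_num [scanMid_eq, h1, h2, h3]
  cases findD 0 moves <;> cases findD 1 moves <;> cases findD 2 moves <;>
    cases findD 3 moves <;> rfl

-- B as (mopt, findD)
theorem portB_char (moves : List Int) :
    choiceMiddleOut_alt moves =
      match mopt moves with
      | none => (PySem.List.pyGet? moves 0).getD 0
      | some m =>
        match findD m moves with
        | some c => c
        | none => (PySem.List.pyGet? moves 0).getD 0 := by
  have hmid : PySem.Int.floordiv (numColsA - 1) 2 = 3 := by decide
  simp only [choiceMiddleOut_alt, hmid, altLoop_none_char]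
  cases hmr : mopt moves with
  | none => rfl
  | some m => cases hf : findD m moves <;> simp [hf]

-- ===== VERDICT (by name: the statement is the Claim_ definition above) =====
theorem choiceMiddleOut_spec : Claim_equal_choiceMiddleOut := by
  intro moves _ _
  unfold Spec_choiceMiddleOut
  rw [portA_char, portB_char]
  cases hmr : mopt moves with
  | none =>
    simp [findD_none_of_mopt_none moves hmr]
  | some m =>
    have hb := mopt_bounds moves m hmr
    obtain ⟨c, hc⟩ := Option.isSome_iff_exists.mp (findD_mopt_isSome moves m hmr)
    have hm0 : m = 0 ∨ m = 1 ∨ m = 2 ∨ m = 3 := by omega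
    rcases hm0 with h | h | h | h <;> subst h
    · simp [hc]
    · simp [findD_lt_none moves 1 hmr 0 (by omega), hc]
    · simp [findD_lt_none moves 2 hmr 0 (by omega), findD_lt_none moves 2 hmr 1 (by omega), hc]
    · simp [findD_lt_none moves 3 hmr 0 (by omega), findD_lt_none moves 3 hmr 1 (by omega),
            findD_lt_none moves 3 hmr 2 (by omega), hc]
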